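-- pv_equiv track=rewrite | github.com/acarvalho113/NetworkIPv4Calc | calculadora_de_redes_ipv4.py | getInverseMask
-- ===== SOURCE A (Python) =====
-- BITS_TOTAL_IPV4 = 32
--
-- def convertBinToDec(valueBin):
--   valueDecInt = 0
--   exp = 0
--   for i in range(len(valueBin)-1, -1, -1):
--     if valueBin[i] == "1":
--       valueDecInt += 2**exp
--     exp += 1
--   return str(valueDecInt)
--
-- def getInverseMask(qtdBits):
--   inverseMask_bin = ""
--   for i in range(qtdBits):
--     inverseMask_bin += "0"
--   inverseMask_bin = inverseMask_bin.ljust(BITS_TOTAL_IPV4, "1")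
--   inverseMask_dec_str = ""
--   for i in range(0, BITS_TOTAL_IPV4, 8):
--     if i > 0:
--       inverseMask_dec_str += "."
--     inverseMask_dec_str += convertBinToDec(inverseMask_bin[i:i+8])
--   return inverseMask_dec_str
-- ===== SOURCE B (Python) =====
-- def getInverseMask(qtdBits):
--   ones = min(32, max(0, 32 - qtdBits))
--   val = (1 << ones) - 1
--   return "{}.{}.{}.{}".format((val >> 24) & 255, (val >> 16) & 255, (val >> 8) & 255, val & 255)
-- ===== Notes on version B (the rewrite author's own statement) =====
-- stated objective: faster
-- what changed: Replaces the binary-string construction (building a 32-char zero/one string, slicing octets, summing per-digit powers of two) with closed-form bit arithmetic: clamp the bit count, form the all-ones value of that width by a shift, and extract the four octets by shifts and masks.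
import Mathlib
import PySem

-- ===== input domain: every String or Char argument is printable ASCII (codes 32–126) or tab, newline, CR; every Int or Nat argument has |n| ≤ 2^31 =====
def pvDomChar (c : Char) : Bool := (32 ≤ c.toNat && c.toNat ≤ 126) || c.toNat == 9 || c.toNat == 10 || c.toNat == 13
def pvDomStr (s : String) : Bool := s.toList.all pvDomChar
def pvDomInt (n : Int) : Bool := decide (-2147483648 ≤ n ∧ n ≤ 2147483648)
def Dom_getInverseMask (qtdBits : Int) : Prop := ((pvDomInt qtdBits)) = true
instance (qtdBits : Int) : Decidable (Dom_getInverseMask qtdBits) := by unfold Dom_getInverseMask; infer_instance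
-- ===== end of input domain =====

-- B replaces A's binary-string building and per-digit summation with closed-form
-- 32-bit shift/mask arithmetic (faster: O(1) vs O(qtdBits)).


-- ===== PORT A =====
def convertBinToDec (valueBin : List Char) : List Char :=
  let st := (PySem.List.pyRange ((valueBin.length : Int) - 1) (-1) (-1)).foldl
    (fun (p : Int × Nat) i =>
      ((if PySem.List.pyGetD valueBin i ' ' = '1' then p.1 + 2 ^ p.2 else p.1), p.2 + 1))
    (0, 0)
  PySem.Int.toChars st.1

def getInverseMask (qtdBits : Int) : String :=
  let bin0 : List Char := (PySem.List.pyRange 0 qtdBits 1).foldl (fun acc _ => acc ++ ['0']) []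
  -- .ljust(32, "1"): pad on the right with '1' up to length 32 (exact hand port)
  let bin : List Char := bin0 ++ List.replicate (32 - bin0.length) '1'
  let out : List Char := (PySem.List.pyRange 0 32 8).foldl
    (fun acc i =>
      (if i > 0 then acc ++ ['.'] else acc) ++
        convertBinToDec (PySem.List.slice bin (some i) (some (i + 8)))) []
  String.ofList out

-- ===== PORT B =====
def getInverseMask_alt (qtdBits : Int) : String :=
  let ones : Int := min 32 (max 0 (32 - qtdBits))
  let val : Int := (1 <<< ones.toNat) - 1
  String.ofList (PySem.Int.toChars (PySem.Int.band (val >>> 24) 255) ++ '.' ::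
    PySem.Int.toChars (PySem.Int.band (val >>> 16) 255) ++ '.' ::
    PySem.Int.toChars (PySem.Int.band (val >>> 8) 255) ++ '.' ::
    PySem.Int.toChars (PySem.Int.band val 255))

-- ===== PRECONDITION & SPEC =====
def Spec_getInverseMask (qtdBits : Int) (out : String) : Prop := out = getInverseMask_alt qtdBits
instance (qtdBits : Int) (out : String) : Decidable (Spec_getInverseMask qtdBits out) := by unfold Spec_getInverseMask; infer_instance

-- ===== CLAIM (what is proved, stated in full; the proofs are below) =====
def Claim_equal_getInverseMask : Prop := ∀ (qtdBits : Int), Dom_getInverseMask qtdBits → Spec_getInverseMask qtdBits (getInverseMask qtdBits)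

-- ===== LEMMAS AND PROOFS =====

-- the '+= "0"' loop only uses the length of the range
theorem foldl_append_zeros (l : List Int) (init : List Char) :
    l.foldl (fun acc _ => acc ++ ['0']) init = init ++ List.replicate l.length '0' := by
  induction l generalizing init with
  | nil => simp
  | cons x xs ih => simp [List.foldl, ih, List.replicate_succ]

theorem alt_congr (q q' : Int)
    (h : min 32 (max 0 (32 - q)) = min 32 (max 0 (32 - q'))) :
    getInverseMask_alt q = getInverseMask_alt q' := by
  simp only [getInverseMask_alt, h]

theorem A_neg (q : Int) (hq : q ≤ 0) : getInverseMask q = getInverseMask 0 := by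
  simp only [getInverseMask,
    PySem.List.pyRange_one_eq_nil hq, PySem.List.pyRange_one_eq_nil (le_refl (0 : Int))]

theorem A_big (q : Int) (hq : 32 < q) : getInverseMask q = "0.0.0.0" := by
  simp only [getInverseMask, foldl_append_zeros, PySem.List.length_pyRange_one,
    List.nil_append]
  have hlen : ((q : Int) - 0).toNat = q.toNat := by omega
  rw [hlen]
  have hpad : 32 - (List.replicate q.toNat '0').length = 0 := by
    simp [List.length_replicate]; omega
  rw [hpad]
  simp only [List.replicate_zero, List.append_nil]
  have hrange : PySem.List.pyRange 0 32 8 = [0, 8, 16, 24] := by decide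
  rw [hrange]
  rw [show ([0, 8, 16, 24] : List Int) = [0] ++ [8] ++ [16] ++ [24] from rfl]
  simp only [List.foldl_append, List.foldl_cons, List.foldl_nil]
  norm_num
  have s0 : PySem.List.slice (List.replicate q.toNat '0') none (some 8) = List.replicate 8 '0' := by
    rw [PySem.List.slice_to _ (by norm_num), List.take_replicate]
    congr 1; omega
  have key : ∀ a b : Int, 0 ≤ a → a + 8 = b → b ≤ (q.toNat : Int) →
      PySem.List.slice (List.replicate q.toNat '0') (some a) (some b) = List.replicate 8 '0' := by
    intro a b ha hab hb
    rw [PySem.List.slice_toNat _ ha (by omega), List.drop_replicate, List.take_replicate]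
    congr 1; omega
  rw [s0, key 8 16 (by norm_num) (by norm_num) (by omega),
    key 16 24 (by norm_num) (by norm_num) (by omega),
    key 24 32 (by norm_num) (by norm_num) (by omega)]
  decide

-- ===== VERDICT (by name: the statement is the Claim_ definition above) =====
theorem getInverseMask_spec : Claim_equal_getInverseMask := by
  intro q _
  unfold Spec_getInverseMask
  by_cases hneg : q ≤ 0
  · rw [A_neg q hneg, alt_congr q 0 (by omega)]
    decide
  · by_cases hbig : 32 < q
    · rw [A_big q hbig, alt_congr q 33 (by omega)]
      decide
    · have h1 : 0 ≤ q := by omega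
      have h2 : q ≤ 32 := by omega
      interval_cases q <;> decide
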